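-- pv_equiv track=rewrite | github.com/raeez/chiral-bar-cobar | compute/lib/swiss_cheese_chain_model.py | _enumerate_weight_tuples
-- ===== SOURCE A (Python) =====
-- from typing import Dict, List, Optional, Tuple
--
-- def _enumerate_weight_tuples(weights: List[int],
--                              length: int) -> List[Tuple[int, ...]]:
--     """Enumerate all tuples of generator weights of given length.
--
--     Returns list of tuples of weights (not names), allowing repetition.
--     """
--     if length == 0:
--         return [()]
--     result = []
--     for t in _enumerate_weight_tuples(weights, length - 1):
--         for w in weights:
--             result.append(t + (w,))
--     return result
-- ===== SOURCE B (Python) =====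
-- from typing import List, Tuple
--
-- def _enumerate_weight_tuples(weights: List[int],
--                              length: int) -> List[Tuple[int, ...]]:
--     """Iterative version: grow a worklist of partial tuples, one sweep per coordinate."""
--     result = [()]
--     for _ in range(length):
--         result = [t + (w,) for t in result for w in weights]
--     return result
-- ===== Notes on version B (the rewrite author's own statement) =====
-- stated objective: simpler
-- what changed: Replaced the recursive definition by an iterative worklist: start from [()] and run 'length' sweeps, each rebuilding the list with one comprehension; same tuple order, no recursion.
import Mathlib
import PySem

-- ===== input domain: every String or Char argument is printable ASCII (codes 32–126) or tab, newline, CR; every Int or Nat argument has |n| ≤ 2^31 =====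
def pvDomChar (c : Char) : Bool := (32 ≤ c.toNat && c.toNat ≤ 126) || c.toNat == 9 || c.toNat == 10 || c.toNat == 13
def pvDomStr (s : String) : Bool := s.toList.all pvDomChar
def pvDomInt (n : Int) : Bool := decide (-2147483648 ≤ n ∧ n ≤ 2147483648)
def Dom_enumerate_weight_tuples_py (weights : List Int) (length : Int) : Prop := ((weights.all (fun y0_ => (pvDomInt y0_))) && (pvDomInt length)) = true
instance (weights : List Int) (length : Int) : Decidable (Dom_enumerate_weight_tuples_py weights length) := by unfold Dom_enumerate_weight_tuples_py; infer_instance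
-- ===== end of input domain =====

-- B replaces A's recursion by an iterative worklist (one sweep per coordinate); objective: simpler.


-- ===== PORT A =====
-- the '≤' in the base guard only makes the recursion total; for length < 0 Python diverges (excluded by Pre_)
def enumerate_weight_tuples_py (weights : List Int) (length : Int) : List (List Int) :=
  if length ≤ 0 then [[]]
  else
    (enumerate_weight_tuples_py weights (length - 1)).foldl
      (fun result t => weights.foldl (fun result w => result ++ [t ++ [w]]) result) []
termination_by length.toNat
decreasing_by omega

-- ===== PORT B =====
def enumerate_weight_tuples_py_alt (weights : List Int) (length : Int) : List (List Int) :=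
  (PySem.List.pyRange 0 length 1).foldl
    (fun result _ => result.flatMap (fun t => weights.map (fun w => t ++ [w]))) [[]]

-- ===== PRECONDITION & SPEC =====
-- Pre_ excludes length < 0, where Python A recurses without reaching its base case (RecursionError).
def Pre_enumerate_weight_tuples_py (weights : List Int) (length : Int) : Prop := 0 ≤ length
instance (weights : List Int) (length : Int) : Decidable (Pre_enumerate_weight_tuples_py weights length) := by unfold Pre_enumerate_weight_tuples_py; infer_instance
def pvWitness_enumerate_weight_tuples_py : List Int × Int := ([1, 2], 2)

def Spec_enumerate_weight_tuples_py (weights : List Int) (length : Int) (out : List (List Int)) : Prop := out = enumerate_weight_tuples_py_alt weights length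
instance (weights : List Int) (length : Int) (out : List (List Int)) : Decidable (Spec_enumerate_weight_tuples_py weights length out) := by unfold Spec_enumerate_weight_tuples_py; infer_instance

-- ===== CLAIM (what is proved, stated in full; the proofs are below) =====
def Claim_equal_enumerate_weight_tuples_py : Prop := ∀ (weights : List Int) (length : Int), Dom_enumerate_weight_tuples_py weights length → Pre_enumerate_weight_tuples_py weights length → Spec_enumerate_weight_tuples_py weights length (enumerate_weight_tuples_py weights length)

-- ===== LEMMAS AND PROOFS =====

-- A's inner nested appends compute the flatMap B uses.
lemma inner_eq (weights : List Int) (res : List (List Int)) (acc : List (List Int)) :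
    res.foldl (fun result t => weights.foldl (fun result w => result ++ [t ++ [w]]) result) acc
      = acc ++ res.flatMap (fun t => weights.map (fun w => t ++ [w])) := by
  induction res generalizing acc with
  | nil => simp
  | cons t ts ih =>
    simp only [List.foldl_cons, List.flatMap_cons, ih]
    have h : ∀ (ws : List Int) (a : List (List Int)),
        ws.foldl (fun result w => result ++ [t ++ [w]]) a = a ++ ws.map (fun w => t ++ [w]) := by
      intro ws
      induction ws with
      | nil => simp
      | cons w ws ihw => intro a; simp [ihw]
    simp [h]

lemma main_eq (weights : List Int) (n : Nat) :
    enumerate_weight_tuples_py weights (n : Int) = enumerate_weight_tuples_py_alt weights (n : Int) := by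
  induction n with
  | zero => simp [enumerate_weight_tuples_py, enumerate_weight_tuples_py_alt, PySem.List.pyRange]
  | succ k ih =>
    rw [enumerate_weight_tuples_py]
    have hpos : ¬ ((k : Int) + 1 ≤ 0) := by omega
    push_cast
    rw [if_neg hpos]
    have : ((k : Int) + 1) - 1 = (k : Int) := by ring
    rw [this, ih]
    unfold enumerate_weight_tuples_py_alt
    rw [show ((k : Int) + 1) = ((k + 1 : Nat) : Int) by push_cast; ring]
    rw [PySem.List.pyRange_zero_nat, PySem.List.pyRange_zero_nat, List.range_succ,
      List.map_append, List.foldl_append]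
    simp only [inner_eq, List.nil_append, List.map_cons, List.map_nil, List.foldl_cons, List.foldl_nil]

-- ===== VERDICT (by name: the statement is the Claim_ definition above) =====
theorem enumerate_weight_tuples_py_spec : Claim_equal_enumerate_weight_tuples_py := by
  intro weights length _ hpre
  unfold Spec_enumerate_weight_tuples_py
  have : length = ((length.toNat : Nat) : Int) := by unfold Pre_enumerate_weight_tuples_py at hpre; omega
  rw [this, main_eq]
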